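-- pv_equiv track=rewrite | github.com/ankul-in/Two-years | KATA48.py | sep_str
-- ===== SOURCE A (Python) =====
-- def sep_str(st):
--     ans=[]
--     words=st.split()
--     if not words:
--         return []
--     maxlength=max(len(word) for word in words)
--     i=0
--     while i<maxlength:
--         row=[]
--         for word in words:
--             if i<len(word):
--                 row.append(word[i])
--             else:
--                 row.append("")
--         ans.append(row)
--         i+=1
--     return ans
-- ===== SOURCE B (Python) =====
-- def sep_str(st):
--     cols = [list(reversed(w)) for w in st.split()]
--     ans = []
--     while any(cols):
--         ans.append([w.pop() if w else '' for w in cols])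
--     return ans
-- ===== Notes on version B (the rewrite author's own statement) =====
-- stated objective: simpler
-- what changed: B transposes by storing each word reversed and popping one character per round off every word until all are exhausted, instead of computing the max length and indexing word[i] in a nested index loop.
import Mathlib
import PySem

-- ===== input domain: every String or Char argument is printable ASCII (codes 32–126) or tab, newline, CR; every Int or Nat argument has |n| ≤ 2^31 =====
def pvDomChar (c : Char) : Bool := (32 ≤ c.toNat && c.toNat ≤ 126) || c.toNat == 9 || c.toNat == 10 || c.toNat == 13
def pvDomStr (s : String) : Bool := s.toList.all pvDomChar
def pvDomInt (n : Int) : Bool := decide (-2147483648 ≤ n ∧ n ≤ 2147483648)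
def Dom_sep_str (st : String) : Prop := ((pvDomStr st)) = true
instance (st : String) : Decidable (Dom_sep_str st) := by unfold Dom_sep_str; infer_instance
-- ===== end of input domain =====

-- B replaces A's max-length + index loop by peeling one character per round off every (reversed) word via O(1) pops until all are exhausted (alternative traversal; return value only — B mutates only its own local lists).


-- ===== PORT A =====
-- words = st.split(); if not words: return []; maxlength = max(len(w) for w in words);
-- while i < maxlength: row = [w[i] if i < len(w) else '' for w in words]; ans.append(row)
def sep_str (st : String) : List (List String) :=
  let words := PySem.Chars.split₀ st.toList
  if words.isEmpty then []
  else
    let maxlength : Nat :=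
      match words.map List.length with
      | [] => 0
      | l :: ls => ls.foldl max l
    (List.range maxlength).foldl
      (fun ans i =>
        ans ++ [words.map (fun w => if h : i < w.length then String.ofList [w[i]] else "")]) []

-- ===== PORT B =====
-- termination helper for B's while-any loop: popping the last chars shrinks the total length
theorem pvSumPopLt (cols : List (List Char)) (h : cols.any (fun w => !w.isEmpty) = true) :
    ((cols.map List.dropLast).map List.length).sum < (cols.map List.length).sum := by
  induction cols with
  | nil => simp at h
  | cons w cs ih =>
    have hle : ∀ ds : List (List Char),
        ((ds.map List.dropLast).map List.length).sum ≤ (ds.map List.length).sum := by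
      intro ds; induction ds with
      | nil => simp
      | cons x xs ihx =>
        simp only [List.map_cons, List.sum_cons, List.length_dropLast]
        omega
    simp only [List.any_cons, Bool.or_eq_true] at h
    simp only [List.map_cons, List.sum_cons, List.length_dropLast]
    rcases h with h | h
    · have hw : w ≠ [] := by cases w <;> simp_all
      have hpos : 0 < w.length := List.length_pos_iff.mpr hw
      have := hle cs; omega
    · have := ih h; omega

-- while any(cols): ans.append([w.pop() if w else '' for w in cols])
-- (w.pop() reads and removes the LAST char of the reversed word = the next char of the word)
def pvPop (cols : List (List Char)) : List (List String) :=
  if h : cols.any (fun w => !w.isEmpty) = true then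
    (cols.map (fun w => match w.getLast? with | none => "" | some c => String.ofList [c]))
      :: pvPop (cols.map List.dropLast)
  else []
termination_by (cols.map List.length).sum
decreasing_by simpa [Function.comp_def] using pvSumPopLt cols h

-- cols = [list(reversed(w)) for w in st.split()]; then the while-any pop loop
def sep_str_alt (st : String) : List (List String) :=
  pvPop ((PySem.Chars.split₀ st.toList).map List.reverse)

-- ===== PRECONDITION & SPEC =====
def Spec_sep_str (st : String) (out : List (List String)) : Prop := out = sep_str_alt st
instance (st : String) (out : List (List String)) : Decidable (Spec_sep_str st out) := by unfold Spec_sep_str; infer_instance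

-- ===== CLAIM (what is proved, stated in full; the proofs are below) =====
def Claim_equal_sep_str : Prop := ∀ (st : String), Dom_sep_str st → Spec_sep_str st (sep_str st)

-- ===== LEMMAS AND PROOFS =====

-- proof-only model of B's loop: peel the FIRST character off every word (pop on the reversal)
theorem pvSumDropLt (cols : List (List Char)) (h : cols.any (fun w => !w.isEmpty) = true) :
    ((cols.map (List.drop 1)).map List.length).sum < (cols.map List.length).sum := by
  induction cols with
  | nil => simp at h
  | cons w cs ih =>
    have hle : ∀ ds : List (List Char),
        ((ds.map (List.drop 1)).map List.length).sum ≤ (ds.map List.length).sum := by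
      intro ds; induction ds with
      | nil => simp
      | cons x xs ihx =>
        simp only [List.map_cons, List.sum_cons]
        have := List.length_drop (l := x) (i := 1); omega
    simp only [List.any_cons, Bool.or_eq_true] at h
    simp only [List.map_cons, List.sum_cons]
    rcases h with h | h
    · have hw : w ≠ [] := by cases w <;> simp_all
      have h1 : (w.drop 1).length = w.length - 1 := List.length_drop
      have hpos : 0 < w.length := List.length_pos_iff.mpr hw
      have := hle cs; omega
    · have := ih h
      have h1 : (w.drop 1).length ≤ w.length := by simp
      omega

def pvHeads (cols : List (List Char)) : List (List String) :=
  if h : cols.any (fun w => !w.isEmpty) = true then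
    (cols.map (fun w => match w with | [] => "" | c :: _ => String.ofList [c]))
      :: pvHeads (cols.map (List.drop 1))
  else []
termination_by (cols.map List.length).sum
decreasing_by simpa [Function.comp_def, List.drop_one] using pvSumDropLt cols h

-- one-step unfolding of the well-founded definitions
theorem pvHeads_def (cols : List (List Char)) : pvHeads cols =
    if cols.any (fun w => !w.isEmpty) = true then
      (cols.map (fun w => match w with | [] => "" | c :: _ => String.ofList [c]))
        :: pvHeads (cols.map (List.drop 1))
    else [] := by
  by_cases h : cols.any (fun w => !w.isEmpty) = true
  · rw [if_pos h]; conv_lhs => unfold pvHeads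
    rw [dif_pos h]
  · rw [if_neg h]; conv_lhs => unfold pvHeads
    rw [dif_neg h]

theorem pvPop_def (cols : List (List Char)) : pvPop cols =
    if cols.any (fun w => !w.isEmpty) = true then
      (cols.map (fun w => match w.getLast? with | none => "" | some c => String.ofList [c]))
        :: pvPop (cols.map List.dropLast)
    else [] := by
  by_cases h : cols.any (fun w => !w.isEmpty) = true
  · rw [if_pos h]; conv_lhs => unfold pvPop
    rw [dif_pos h]
  · rw [if_neg h]; conv_lhs => unfold pvPop
    rw [dif_neg h]

-- popping from the reversed words is peeling the heads of the words
theorem pvPop_eq_heads (cols : List (List Char)) :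
    pvPop (cols.map List.reverse) = pvHeads cols := by
  generalize hn : (cols.map List.length).sum = n
  induction n using Nat.strong_induction_on generalizing cols with
  | _ n ih =>
    by_cases hany : cols.any (fun w => !w.isEmpty) = true
    · have hanyr : ((cols.map List.reverse).any fun w => !w.isEmpty) = true := by
        simpa [List.any_map, Function.comp_def] using hany
      rw [pvPop_def, pvHeads_def, if_pos hanyr, if_pos hany]
      refine congrArg₂ List.cons ?_ ?_
      · rw [List.map_map]
        apply List.map_congr_left
        intro w _
        rcases w with _ | ⟨c, t⟩
        · simp
        · simp [List.getLast?_reverse]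
      · have harg : (cols.map List.reverse).map List.dropLast
            = (cols.map (List.drop 1)).map List.reverse := by
          simp [List.map_map, Function.comp_def, List.drop_one]
        rw [harg]
        refine ih _ ?_ _ rfl
        rw [← hn]
        simpa [Function.comp_def, List.drop_one] using pvSumDropLt cols hany
    · have hanyr : ¬ ((cols.map List.reverse).any fun w => !w.isEmpty) = true := by
        simp only [List.any_map, Function.comp_def, List.isEmpty_reverse]
        simpa using hany
      rw [pvPop_def, pvHeads_def, if_neg hanyr, if_neg hany]

-- A's row entry, named for the proofs
def pvEntry (i : Nat) (w : List Char) : String :=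
  if h : i < w.length then String.ofList [w[i]] else ""

theorem pvEntry_zero (w : List Char) :
    pvEntry 0 w = (match w with | [] => "" | c :: _ => String.ofList [c]) := by
  cases w <;> simp [pvEntry]

theorem pvEntry_drop (i : Nat) (w : List Char) :
    pvEntry i (w.drop 1) = pvEntry (i + 1) w := by
  unfold pvEntry
  rcases w with _ | ⟨c, cs⟩
  · simp
  · by_cases h : i < cs.length
    · simp [h, Nat.succ_lt_succ h]
    · simp [h]

theorem pvFoldlMaxPred (l : List Nat) (a : Nat) :
    (l.map (· - 1)).foldl max (a - 1) = l.foldl max a - 1 := by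
  induction l generalizing a with
  | nil => simp
  | cons x xs ih =>
    simp only [List.map_cons, List.foldl_cons]
    have h : max (a - 1) (x - 1) = max a x - 1 := by omega
    rw [h, ih]

theorem pvHeads_eq (n : Nat) (ws : List (List Char))
    (hn : (ws.map List.length).foldl max 0 = n) :
    pvHeads ws = (List.range n).map (fun i => ws.map (pvEntry i)) := by
  induction n generalizing ws with
  | zero =>
    have hall : ∀ w ∈ ws, w.isEmpty := by
      intro w hw
      have := ((PySem.List.le_foldl_max (ws.map List.length) 0).2 w.length
        (List.mem_map_of_mem hw))
      cases w <;> simp_all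
    have hany : ws.any (fun w => !w.isEmpty) = false := by
      simp only [List.any_eq_false]
      intro w hw; simp [hall w hw]
    rw [pvHeads_def]; simp [hany]
  | succ n ih =>
    have hany : ws.any (fun w => !w.isEmpty) = true := by
      rcases PySem.List.foldl_max_mem (ws.map List.length) 0 with h0 | hmem
      · omega
      · rw [hn] at hmem
        rcases List.mem_map.mp hmem with ⟨w, hw, hlen⟩
        refine List.any_eq_true.mpr ⟨w, hw, ?_⟩
        cases w <;> simp_all
    rw [pvHeads_def]; simp only [hany, if_true]
    have hdrop : ((ws.map (List.drop 1)).map List.length).foldl max 0 = n := by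
      have h1 : (ws.map (List.drop 1)).map List.length
          = (ws.map List.length).map (· - 1) := by
        simp [List.map_map, Function.comp_def]
      rw [h1]
      have := pvFoldlMaxPred (ws.map List.length) 0
      simpa [hn] using this
    rw [ih _ hdrop]
    rw [List.range_succ_eq_map]
    simp only [List.map_cons, List.map_map]
    refine congrArg₂ List.cons ?_ ?_
    · exact List.map_congr_left (fun w _ => (pvEntry_zero w).symm)
    · apply List.map_congr_left
      intro i _
      simp only [Function.comp_def]
      apply List.map_congr_left
      intro w _
      simpa [Nat.succ_eq_add_one] using pvEntry_drop i w

theorem pvMaxMatch (lens : List Nat) :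
    (match lens with | [] => 0 | l :: ls => ls.foldl max l) = lens.foldl max 0 := by
  cases lens with
  | nil => rfl
  | cons l ls => simp [List.foldl_cons]

-- ===== VERDICT (by name: the statement is the Claim_ definition above) =====
theorem sep_str_spec : Claim_equal_sep_str := by
  intro st _
  unfold Spec_sep_str sep_str sep_str_alt
  rw [pvPop_eq_heads]
  by_cases hempty : (PySem.Chars.split₀ st.toList).isEmpty
  · have hnil : PySem.Chars.split₀ st.toList = [] := List.isEmpty_iff.mp hempty
    rw [hnil, pvHeads_def]
    simp
  · simp only [hempty]
    rw [PySem.List.foldl_append_singleton_eq_map]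
    rw [pvMaxMatch ((PySem.Chars.split₀ st.toList).map List.length)]
    rw [pvHeads_eq (((PySem.Chars.split₀ st.toList).map List.length).foldl max 0) _ rfl]
    rfl
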